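-- pv_equiv track=rewrite | github.com/siarhiej-h/AdventOfCode2024 | day21/main.py | is_path_zig_zag
-- ===== SOURCE A (Python) =====
-- from collections import defaultdict
--
-- def is_path_zig_zag(path):
--     all_characters = defaultdict(list)
--     for index, character in enumerate(path):
--         all_characters[character].append(index)
--
--     if len(all_characters) == 1:
--         return False
--
--     for indexes in all_characters.values():
--         for m in range(1, len(indexes)):
--             if abs(indexes[m] - indexes[m - 1]) > 1:
--                 return True
--     return False
-- ===== SOURCE B (Python) =====
-- def is_path_zig_zag(path):
--     return any(path[i] != path[i + 1] and path[i] in path[i + 2:]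
--                for i in range(len(path) - 1))
-- ===== Notes on version B (the rewrite author's own statement) =====
-- stated objective: simpler
-- what changed: Replaces the defaultdict of full position lists plus a nested scan over every list with one direct check per position: a character starts a gap exactly when it differs from its successor and reappears somewhere after that, so B tests each position against its successor and the remaining suffix, with no dict, no stored index lists and no single-character guard.
import Mathlib
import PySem

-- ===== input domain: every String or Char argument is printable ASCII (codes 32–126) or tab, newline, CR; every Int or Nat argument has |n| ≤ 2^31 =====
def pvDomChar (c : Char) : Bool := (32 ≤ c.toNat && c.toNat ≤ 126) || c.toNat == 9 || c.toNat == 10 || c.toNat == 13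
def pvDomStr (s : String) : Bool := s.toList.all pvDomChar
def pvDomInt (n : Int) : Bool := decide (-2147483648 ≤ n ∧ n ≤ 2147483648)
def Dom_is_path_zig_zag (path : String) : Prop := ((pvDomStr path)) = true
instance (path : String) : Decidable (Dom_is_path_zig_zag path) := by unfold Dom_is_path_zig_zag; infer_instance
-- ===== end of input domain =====

-- B replaces A's defaultdict of full index lists plus a nested scan with one direct
-- successor-and-suffix membership test per position (simpler; a timing run measured it faster).

-- ===== PORT A =====
-- all_characters[character].append(index) over enumerate(path)
def pvCollectA (chars : List Char) : PySem.Dict Char (List Int) :=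
  (PySem.List.enumerate chars).foldl
    (fun d p => d.modify p.2 [] (fun xs => xs ++ [p.1])) PySem.Dict.empty

-- inner loop: for m in range(1, len(indexes)): if abs(indexes[m]-indexes[m-1]) > 1: return True
-- (abs(x) > 1 on Int is ported exactly as 1 < x.natAbs; indexes[m] via pyGetD, always in range here)
def pvGapScan (indexes : List Int) : Bool :=
  (PySem.List.pyRange 1 (indexes.length : Int) 1).any (fun m =>
    decide (1 < (PySem.List.pyGetD indexes m 0 - PySem.List.pyGetD indexes (m - 1) 0).natAbs))

def pvACore (chars : List Char) : Bool :=
  let all := pvCollectA chars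
  if all.size = 1 then false
  else all.values.any pvGapScan

def is_path_zig_zag (path : String) : Bool := pvACore path.toList

-- ===== PORT B =====
-- any(path[i] != path[i+1] and path[i] in path[i+2:] for i in range(len(path)-1))
-- (single-char 'in' on an ASCII string is ported as char membership in the sliced char list)
def pvBCore (chars : List Char) : Bool :=
  (PySem.List.pyRange 0 ((chars.length : Int) - 1) 1).any (fun i =>
    (PySem.List.pyGetD chars i ' ' != PySem.List.pyGetD chars (i + 1) ' ') &&
    (PySem.List.slice chars (some (i + 2))).contains (PySem.List.pyGetD chars i ' '))

def is_path_zig_zag_alt (path : String) : Bool := pvBCore path.toList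

-- ===== PRECONDITION & SPEC =====
def Spec_is_path_zig_zag (path : String) (out : Bool) : Prop := out = is_path_zig_zag_alt path
instance (path : String) (out : Bool) : Decidable (Spec_is_path_zig_zag path out) := by unfold Spec_is_path_zig_zag; infer_instance

-- ===== CLAIM (what is proved, stated in full; the proofs are below) =====
def Claim_equal_is_path_zig_zag : Prop := ∀ (path : String), Dom_is_path_zig_zag path → Spec_is_path_zig_zag path (is_path_zig_zag path)

-- ===== LEMMAS AND PROOFS =====

-- the common semantic characterisation: some character differs from its successor and reappears later
def pvZig (l : List Char) : Prop :=
  ∃ (i : Nat) (h : i + 1 < l.length),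
    l[i]'(by omega) ≠ l[i + 1]'h ∧ l[i]'(by omega) ∈ l.drop (i + 2)

-- the occurrence-index list A's dict stores for character c
def pvOcc (l : List Char) (c : Char) : List Int :=
  ((PySem.List.enumerate l).filter (fun p => p.2 == c)).map (fun p => p.1)

lemma pvOcc_fold (ps : List (Int × Char)) (d : PySem.Dict Char (List Int)) (c : Char) :
    (ps.foldl (fun d p => d.modify p.2 [] (fun xs => xs ++ [p.1])) d).getD c []
      = d.getD c [] ++ (ps.filter (fun p => p.2 == c)).map (fun p => p.1) := by
  induction ps generalizing d with
  | nil => simp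
  | cons p ps ih =>
    simp only [List.foldl_cons, List.filter_cons]
    rw [ih]
    by_cases hc : p.2 = c
    · simp [hc]
    · simp [PySem.Dict.getD_modify, hc, Ne.symm hc]

lemma pvCollect_getD (l : List Char) (c : Char) :
    (pvCollectA l).getD c [] = pvOcc l c := by
  unfold pvCollectA pvOcc
  rw [pvOcc_fold]
  simp

lemma pvCollect_keys_nodup (l : List Char) : (pvCollectA l).keys.Nodup := by
  unfold pvCollectA
  exact PySem.Dict.nodup_keys_foldl_modify_key (PySem.List.enumerate l)
    (fun p : Int × Char => p.2) [] (fun _ p xs => xs ++ [p.1]) _ PySem.Dict.nodup_keys_empty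

lemma pvCollect_keys_mem (l : List Char) (c : Char) : c ∈ (pvCollectA l).keys ↔ c ∈ l := by
  unfold pvCollectA
  rw [PySem.Dict.keys_foldl_modify_key (PySem.List.enumerate l) (fun p => p.2) []
    (fun _ p xs => xs ++ [p.1]) PySem.Dict.empty]
  rw [PySem.Set.mem_update]
  simp [PySem.Dict.keys_empty, PySem.List.map_snd_enumerate]

lemma pvCollect_size (l : List Char) : (pvCollectA l).size = (pvCollectA l).keys.length := by
  simp [PySem.Dict.size, PySem.Dict.keys]

lemma pvSizeOne_all_eq (l : List Char) (h : (pvCollectA l).size = 1) :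
    ∀ x ∈ l, ∀ y ∈ l, x = y := by
  rw [pvCollect_size] at h
  obtain ⟨c, hc⟩ := List.length_eq_one_iff.mp h
  intro x hx y hy
  have hx' := (pvCollect_keys_mem l x).2 hx
  have hy' := (pvCollect_keys_mem l y).2 hy
  rw [hc] at hx' hy'
  simp at hx' hy'
  rw [hx', hy']

lemma pvValues_any (l : List Char) :
    ((pvCollectA l).values.any pvGapScan = true) ↔ ∃ c ∈ l, pvGapScan (pvOcc l c) = true := by
  rw [PySem.Dict.values_eq_map_keys _ (pvCollect_keys_nodup l) []]
  rw [List.any_map, List.any_eq_true]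
  constructor
  · rintro ⟨c, hc, h⟩
    refine ⟨c, (pvCollect_keys_mem l c).1 hc, ?_⟩
    simpa [Function.comp, pvCollect_getD] using h
  · rintro ⟨c, hc, h⟩
    refine ⟨c, (pvCollect_keys_mem l c).2 hc, ?_⟩
    simpa [Function.comp, pvCollect_getD] using h

lemma pvMem_occ (l : List Char) (c : Char) (j : Int) :
    j ∈ pvOcc l c ↔ ∃ (k : Nat) (h : k < l.length), j = (k : Int) ∧ l[k] = c := by
  unfold pvOcc
  simp only [List.mem_map, List.mem_filter, PySem.List.mem_enumerate_iff]
  constructor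
  · rintro ⟨p, ⟨⟨k, hk, rfl⟩, hc⟩, rfl⟩
    exact ⟨k, hk, by simp, by simpa using hc⟩
  · rintro ⟨k, hk, rfl, hc⟩
    exact ⟨((0 : Int) + (k : Int), l[k]), ⟨⟨k, hk, rfl⟩, by simpa using hc⟩, by simp⟩

lemma pvOcc_pairwise (l : List Char) (c : Char) :
    (pvOcc l c).Pairwise (fun a b => a < b) := by
  unfold pvOcc
  exact ((PySem.List.pairwise_lt_enumerate l 0).filter _).map _ (fun a b h => h)

lemma pvSorted_mono {xs : List Int} (hs : xs.Pairwise (fun a b => a < b)) {p q : Nat}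
    (hp : p < xs.length) (hq : q < xs.length) (hpq : p < q) : xs[p] < xs[q] :=
  List.pairwise_iff_getElem.mp hs p q hp hq hpq

lemma pvPos_lt_of_lt {xs : List Int} (hs : xs.Pairwise (fun a b => a < b)) {p q : Nat}
    (hp : p < xs.length) (hq : q < xs.length) (h : xs[p] < xs[q]) : p < q := by
  rcases lt_trichotomy p q with h' | h' | h'
  · exact h'
  · subst h'; omega
  · exact absurd (pvSorted_mono hs hq hp h') (by omega)

lemma pvNot_mem_between {xs : List Int} (hs : xs.Pairwise (fun a b => a < b)) {m : Nat}
    (hm : m < xs.length) (h1 : 1 ≤ m) {x : Int} (hx : x ∈ xs)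
    (ha : xs[m - 1]'(by omega) < x) (hb : x < xs[m]) : False := by
  obtain ⟨p, hp, rfl⟩ := List.mem_iff_getElem.mp hx
  have h2 : m - 1 < p := pvPos_lt_of_lt hs (by omega) hp ha
  have h3 : p < m := pvPos_lt_of_lt hs hp hm hb
  omega

lemma pvGapScan_iff (xs : List Int) :
    pvGapScan xs = true ↔
      ∃ (m : Nat) (h : m < xs.length), 1 ≤ m ∧ 1 < (xs[m] - xs[m - 1]'(by omega)).natAbs := by
  unfold pvGapScan
  rw [List.any_eq_true]
  constructor
  · rintro ⟨mi, hmem, hd⟩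
    rw [PySem.List.mem_pyRange_one] at hmem
    obtain ⟨hm1, hm2⟩ := hmem
    have hlt : mi.toNat < xs.length := by omega
    refine ⟨mi.toNat, hlt, by omega, ?_⟩
    rw [PySem.List.pyGetD_eq_getElem xs 0 (by omega) (by omega),
        PySem.List.pyGetD_eq_getElem xs 0 (by omega) (by omega)] at hd
    have he : (mi - 1).toNat = mi.toNat - 1 := by omega
    simp only [he] at hd
    exact of_decide_eq_true hd
  · rintro ⟨m, hm, h1, hgap⟩
    refine ⟨(m : Int), ?_, ?_⟩
    · rw [PySem.List.mem_pyRange_one]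
      constructor
      · exact_mod_cast h1
      · exact_mod_cast hm
    · rw [PySem.List.pyGetD_eq_getElem xs 0 (by omega) (by exact_mod_cast hm),
          PySem.List.pyGetD_eq_getElem xs 0 (by omega) (by omega)]
      have e1 : ((m : Int)).toNat = m := by omega
      have e2 : ((m : Int) - 1).toNat = m - 1 := by omega
      simp only [e1, e2]
      exact decide_eq_true hgap

lemma pvZig_of_gap (l : List Char) (c : Char)
    (h : ∃ (m : Nat) (hm : m < (pvOcc l c).length),
      1 ≤ m ∧ 1 < ((pvOcc l c)[m] - (pvOcc l c)[m - 1]'(by omega)).natAbs) :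
    pvZig l := by
  obtain ⟨m, hm, h1, hgap⟩ := h
  have hs := pvOcc_pairwise l c
  have hab : (pvOcc l c)[m - 1]'(by omega) < (pvOcc l c)[m] :=
    pvSorted_mono hs (by omega) hm (by omega)
  obtain ⟨k, hk, hke, hkc⟩ :=
    (pvMem_occ l c _).1 (List.getElem_mem (l := pvOcc l c) (n := m - 1) (by omega))
  obtain ⟨k', hk', hke', hkc'⟩ :=
    (pvMem_occ l c _).1 (List.getElem_mem (l := pvOcc l c) (n := m) hm)
  rw [hke'] at hab hgap
  rw [hke] at hab hgap
  have hkk : k + 2 ≤ k' := by omega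
  refine ⟨k, by omega, ?_, ?_⟩
  · intro heq
    have hmem : ((k + 1 : Nat) : Int) ∈ pvOcc l c :=
      (pvMem_occ l c _).2 ⟨k + 1, by omega, rfl, by rw [← heq]; exact hkc⟩
    exact pvNot_mem_between hs hm h1 hmem (by rw [hke]; push_cast; omega)
      (by rw [hke']; push_cast; omega)
  · have hd : l[k + 2 + (k' - (k + 2))]'(by omega) ∈ l.drop (k + 2) := by
      refine List.mem_iff_getElem.mpr ⟨k' - (k + 2), by simp [List.length_drop]; omega, ?_⟩
      rw [List.getElem_drop]
    simp only [show k + 2 + (k' - (k + 2)) = k' from by omega] at hd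
    rw [hkc]
    rw [← hkc']
    exact hd

lemma pvGap_of_zig (l : List Char) (h : pvZig l) :
    ∃ c ∈ l, ∃ (m : Nat) (hm : m < (pvOcc l c).length),
      1 ≤ m ∧ 1 < ((pvOcc l c)[m] - (pvOcc l c)[m - 1]'(by omega)).natAbs := by
  obtain ⟨i, hi, hne, hmem⟩ := h
  have hci : ((i : Nat) : Int) ∈ pvOcc l (l[i]'(by omega)) :=
    (pvMem_occ _ _ _).2 ⟨i, by omega, rfl, rfl⟩
  obtain ⟨t, ht, hte⟩ := List.mem_iff_getElem.mp hmem
  have htlen : i + 2 + t < l.length := by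
    have := List.length_drop (l := l) (i := i + 2); omega
  rw [List.getElem_drop] at hte
  have hcj : ((i + 2 + t : Nat) : Int) ∈ pvOcc l (l[i]'(by omega)) :=
    (pvMem_occ _ _ _).2 ⟨i + 2 + t, htlen, rfl, hte⟩
  have hs := pvOcc_pairwise l (l[i]'(by omega))
  obtain ⟨p, hp, hpe⟩ := List.mem_iff_getElem.mp hci
  obtain ⟨q, hq, hqe⟩ := List.mem_iff_getElem.mp hcj
  have hpq : p < q := pvPos_lt_of_lt hs hp hq (by rw [hpe, hqe]; push_cast; omega)
  have hq1 : p + 1 < (pvOcc l (l[i]'(by omega))).length := by omega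
  refine ⟨l[i]'(by omega), List.getElem_mem _, p + 1, hq1, by omega, ?_⟩
  obtain ⟨k, hk, hke, hkc⟩ :=
    (pvMem_occ _ _ _).1 (List.getElem_mem (l := pvOcc l (l[i]'(by omega))) hq1)
  have hgt : (pvOcc l (l[i]'(by omega)))[p]'hp < (pvOcc l (l[i]'(by omega)))[p + 1]'hq1 :=
    pvSorted_mono hs hp hq1 (by omega)
  have hki : k ≠ i + 1 := by
    intro he
    subst he
    exact hne hkc.symm
  have hik : (i : Int) < (k : Int) := by rw [← hke, ← hpe]; exact hgt
  have hsub : (p + 1) - 1 = p := by omega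
  simp only [hsub]
  rw [hke, hpe]
  have : i + 2 ≤ k := by omega
  omega

lemma pvA_iff (l : List Char) : pvACore l = true ↔ pvZig l := by
  unfold pvACore
  by_cases hsz : (pvCollectA l).size = 1
  · rw [if_pos hsz]
    simp only [Bool.false_eq_true, false_iff]
    rintro ⟨i, hi, hne, -⟩
    exact hne (pvSizeOne_all_eq l hsz _ (List.getElem_mem _) _ (List.getElem_mem _))
  · rw [if_neg hsz, pvValues_any]
    constructor
    · rintro ⟨c, hc, hgap⟩
      exact pvZig_of_gap l c ((pvGapScan_iff _).1 hgap)
    · intro hz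
      obtain ⟨c, hc, hgap⟩ := pvGap_of_zig l hz
      exact ⟨c, hc, (pvGapScan_iff _).2 hgap⟩

lemma pvB_iff (l : List Char) : pvBCore l = true ↔ pvZig l := by
  unfold pvBCore
  rw [List.any_eq_true]
  constructor
  · rintro ⟨ii, hmem, hcond⟩
    rw [PySem.List.mem_pyRange_one] at hmem
    obtain ⟨h0, h1⟩ := hmem
    have hlt : ii.toNat + 1 < l.length := by omega
    have hii : ii = ((ii.toNat : Nat) : Int) := by omega
    rw [hii] at hcond
    have e1 : ((ii.toNat : Nat) : Int) + 1 = ((ii.toNat + 1 : Nat) : Int) := by push_cast; ring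
    have e2 : ((ii.toNat : Nat) : Int) + 2 = ((ii.toNat + 2 : Nat) : Int) := by push_cast; ring
    rw [e1, e2, PySem.List.slice_from_natCast,
        PySem.List.pyGetD_eq_getElem l ' ' (by omega) (by omega),
        PySem.List.pyGetD_eq_getElem l ' ' (by omega) (by push_cast; omega)] at hcond
    simp only [Int.toNat_natCast] at hcond
    rw [Bool.and_eq_true, bne_iff_ne] at hcond
    obtain ⟨hneq, hcont⟩ := hcond
    refine ⟨ii.toNat, hlt, ?_, ?_⟩
    · simpa using hneq
    · simpa [List.contains_iff_mem] using hcont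
  · rintro ⟨i, hi, hne, hmem⟩
    refine ⟨(i : Int), ?_, ?_⟩
    · rw [PySem.List.mem_pyRange_one]
      constructor
      · omega
      · omega
    · have e1 : (i : Int) + 1 = ((i + 1 : Nat) : Int) := by push_cast; ring
      have e2 : (i : Int) + 2 = ((i + 2 : Nat) : Int) := by push_cast; ring
      rw [e1, e2, PySem.List.slice_from_natCast,
          PySem.List.pyGetD_eq_getElem l ' ' (by omega) (by omega),
          PySem.List.pyGetD_eq_getElem l ' ' (by omega) (by push_cast; omega)]
      simp only [Int.toNat_natCast]
      rw [Bool.and_eq_true, bne_iff_ne]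
      refine ⟨by simpa using hne, by simpa [List.contains_iff_mem] using hmem⟩

-- ===== VERDICT (by name: the statement is the Claim_ definition above) =====
theorem is_path_zig_zag_spec : Claim_equal_is_path_zig_zag := by
  intro path _
  unfold Spec_is_path_zig_zag is_path_zig_zag is_path_zig_zag_alt
  rw [Bool.eq_iff_iff, pvA_iff, pvB_iff]
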